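-- pv_equiv track=rewrite | github.com/NVJY/autoio | autoio-interfaces/mess_io/reader/rates.py | reactions
-- ===== SOURCE A (Python) =====
-- def reactions(out_str,
--               third_body=(None,),
--               read_fake=False, read_self=False, read_rev=True):
--     """ Read the reactions from the output file.
--
--         Currently, we assume we don't care about the third body
--         and have the user pass it.
--
--         Returns the reactions in tuple list (reacs, prods, third_body)
--         where reacs and prods are tuples
--
--         Ignores 'Capture' reactions
--     """
--
--     # Read all of the reactions out of the file
--     init_rxns = ()
--     for line in out_str.splitlines():
--         if 'T(K)' in line and '->' in line:
--             init_rxns += tuple(line.strip().split()[1:])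
--
--     # Remove duplcates while preserving order
--     init_rxns = tuple(n for i, n in enumerate(init_rxns)
--                       if n not in init_rxns[:i])
--
--     # Remove capture reactions
--     init_rxns = tuple(rxn for rxn in init_rxns
--                       if rxn != 'Capture')
--
--     # Build list of reaction pairs: rct->prd = (rct, prd)
--     # Filter out reaction as necessary
--     rxn_pairs = ()
--     for rxn in init_rxns:
--         [rct, prd] = rxn.split('->')
--         if not read_fake:
--             if 'F' in rxn or 'B' in rxn:
--                 continue
--         if not read_self:
--             if rct == prd:
--                 continue
--         if prd:  # removes rct->  reactions in output
--             rxn_pairs += ((rct, prd),)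
--
--     # Remove reverse reactions, if requested
--     if read_rev:
--         sort_rxn_pairs = rxn_pairs
--     else:
--         sort_rxn_pairs = ()
--         for pair in rxn_pairs:
--             rct, prd = pair
--             if (rct, prd) in sort_rxn_pairs or (prd, rct) in sort_rxn_pairs:
--                 continue
--             sort_rxn_pairs += ((rct, prd),)
--
--     # Add the third body to the sorted pairs
--     fin_rxns = ()
--     for rxn in sort_rxn_pairs:
--         rct, prd = rxn
--         fin_rxns += (
--             ((rct,), (prd,), third_body),
--         )
--
--     return fin_rxns
-- ===== SOURCE B (Python) =====
-- def reactions(out_str,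
--               third_body=(None,),
--               read_fake=False, read_self=False, read_rev=True):
--     """Single streaming pass: dedup tokens, filter, and build the result in one traversal."""
--     seen = set()
--     accepted = set()
--     fin = []
--     for line in out_str.splitlines():
--         if 'T(K)' in line and '->' in line:
--             for tok in line.strip().split()[1:]:
--                 if tok in seen:
--                     continue
--                 seen.add(tok)
--                 if tok == 'Capture':
--                     continue
--                 rct, prd = tok.split('->')
--                 if not read_fake and ('F' in tok or 'B' in tok):
--                     continue
--                 if not read_self and rct == prd:
--                     continue
--                 if not prd:
--                     continue
--                 if not read_rev:
--                     if (rct, prd) in accepted or (prd, rct) in accepted: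
--                         continue
--                     accepted.add((rct, prd))
--                 fin.append(((rct,), (prd,), third_body))
--     return tuple(fin)
-- ===== Notes on version B (the rewrite author's own statement) =====
-- stated objective: alternative
-- what changed: B replaces A's six sequential full-collection passes (collect tokens, dedup via prefix membership, capture filter, pair-building filter pass, reverse-dedup pass, third-body pass) with one fused streaming pass over the lines that carries a seen-token set, an accepted-pair set and the output list, emitting each surviving triple immediately.
import Mathlib
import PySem

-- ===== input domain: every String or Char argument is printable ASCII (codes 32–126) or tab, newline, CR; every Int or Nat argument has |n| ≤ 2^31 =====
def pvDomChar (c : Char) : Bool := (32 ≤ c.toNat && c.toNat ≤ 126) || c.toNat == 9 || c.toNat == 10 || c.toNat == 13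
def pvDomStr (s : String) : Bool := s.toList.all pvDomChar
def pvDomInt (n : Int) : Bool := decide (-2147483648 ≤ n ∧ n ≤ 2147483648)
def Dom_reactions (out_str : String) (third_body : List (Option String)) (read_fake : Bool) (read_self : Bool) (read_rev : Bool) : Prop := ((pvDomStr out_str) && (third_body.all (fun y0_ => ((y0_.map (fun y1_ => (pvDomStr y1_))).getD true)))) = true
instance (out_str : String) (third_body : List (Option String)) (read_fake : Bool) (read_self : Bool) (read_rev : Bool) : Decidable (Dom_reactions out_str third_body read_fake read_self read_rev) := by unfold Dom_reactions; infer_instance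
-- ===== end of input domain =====

-- B fuses A's six sequential passes into one streaming pass with a seen-token set and an accepted-pair set (objective: alternative decomposition, same values).

-- ===== PORT A =====
def reactions (out_str : String) (third_body : List (Option String)) (read_fake : Bool) (read_self : Bool) (read_rev : Bool) : List (List String × List String × List (Option String)) :=
  -- init_rxns: tokens gathered from every line containing 'T(K)' and '->'
  let init_rxns : List String :=
    (PySem.Str.splitlines out_str).foldl (fun acc line =>
      if PySem.Str.isIn "T(K)" line && PySem.Str.isIn "->" line then
        acc ++ PySem.List.slice (PySem.Str.split₀ (PySem.Str.strip line)) (some 1) none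
      else acc) []
  -- remove duplicates while preserving order
  let init_rxns₂ : List String :=
    ((PySem.List.enumerate init_rxns 0).filter
      (fun p => !((PySem.List.slice init_rxns none (some p.1)).contains p.2))).map (·.2)
  -- remove capture reactions
  let init_rxns₃ : List String := init_rxns₂.filter (fun rxn => rxn != "Capture")
  -- build list of reaction pairs, filtering as necessary
  let rxn_pairs : List (String × String) :=
    init_rxns₃.foldl (fun pairs rxn =>
      match PySem.Str.split? rxn "->" with
      | some [rct, prd] =>
        if !read_fake && (PySem.Str.isIn "F" rxn || PySem.Str.isIn "B" rxn) then pairs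
        else if !read_self && rct == prd then pairs
        else if prd != "" then pairs ++ [(rct, prd)]
        else pairs
      | _ => pairs  -- Python raises ValueError on a token not splitting in two; excluded by Pre_reactions
      ) []
  -- remove reverse reactions, if requested
  let sort_rxn_pairs : List (String × String) :=
    if read_rev then rxn_pairs
    else rxn_pairs.foldl (fun s p =>
      if s.contains (p.1, p.2) || s.contains (p.2, p.1) then s else s ++ [(p.1, p.2)]) []
  -- add the third body
  sort_rxn_pairs.foldl (fun fin p => fin ++ [([p.1], [p.2], third_body)]) []

-- ===== PORT B =====
-- one streaming step per token: state = (seen tokens, accepted pairs, output so far)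
def pvBStep (read_fake read_self read_rev : Bool) (third_body : List (Option String))
    (st : PySem.Set String × PySem.Set (String × String) × List (List String × List String × List (Option String)))
    (tok : String) : PySem.Set String × PySem.Set (String × String) × List (List String × List String × List (Option String)) :=
  if PySem.Set.contains st.1 tok then st
  else
    let seen := PySem.Set.add st.1 tok
    if tok == "Capture" then (seen, st.2.1, st.2.2)
    else
      -- 'rct, prd = tok.split('->')': Python raises ValueError unless exactly two parts (excluded by Pre_reactions)
      match (PySem.Str.split? tok "->").getD [] with
      | [] => (seen, st.2.1, st.2.2)
      | rct :: rest₁ =>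
        match rest₁ with
        | [] => (seen, st.2.1, st.2.2)
        | prd :: rest₂ =>
          match rest₂ with
          | _ :: _ => (seen, st.2.1, st.2.2)
          | [] =>
            if !read_fake && (PySem.Str.isIn "F" tok || PySem.Str.isIn "B" tok) then (seen, st.2.1, st.2.2)
            else if !read_self && rct == prd then (seen, st.2.1, st.2.2)
            else if prd == "" then (seen, st.2.1, st.2.2)
            else if !read_rev then
              if PySem.Set.contains st.2.1 (rct, prd) || PySem.Set.contains st.2.1 (prd, rct) then (seen, st.2.1, st.2.2)
              else (seen, PySem.Set.add st.2.1 (rct, prd), st.2.2 ++ [([rct], [prd], third_body)])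
            else (seen, st.2.1, st.2.2 ++ [([rct], [prd], third_body)])

def reactions_alt (out_str : String) (third_body : List (Option String)) (read_fake : Bool) (read_self : Bool) (read_rev : Bool) : List (List String × List String × List (Option String)) :=
  ((PySem.Str.splitlines out_str).foldl (fun st line =>
    if PySem.Str.isIn "T(K)" line && PySem.Str.isIn "->" line then
      (PySem.List.slice (PySem.Str.split₀ (PySem.Str.strip line)) (some 1) none).foldl
        (pvBStep read_fake read_self read_rev third_body) st
    else st) ((PySem.Set.empty : PySem.Set String), (PySem.Set.empty : PySem.Set (String × String)), [])).2.2

-- ===== PRECONDITION & SPEC =====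
-- Pre_ excludes exactly the inputs where a reaction token (other than 'Capture') does not split on '->'
-- into two parts, on which Python A raises ValueError at the unpacking '[rct, prd] = rxn.split('->')'.
def Pre_reactions (out_str : String) (third_body : List (Option String)) (read_fake : Bool) (read_self : Bool) (read_rev : Bool) : Prop :=
  ∀ line ∈ PySem.Str.splitlines out_str,
    (PySem.Str.isIn "T(K)" line && PySem.Str.isIn "->" line) = true →
    ∀ tok ∈ PySem.List.slice (PySem.Str.split₀ (PySem.Str.strip line)) (some 1) none,
      tok = "Capture" ∨ ((PySem.Str.split? tok "->").getD []).length = 2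
instance (out_str : String) (third_body : List (Option String)) (read_fake : Bool) (read_self : Bool) (read_rev : Bool) : Decidable (Pre_reactions out_str third_body read_fake read_self read_rev) := by unfold Pre_reactions; infer_instance

def pvWitness_reactions : String × List (Option String) × Bool × Bool × Bool :=
  ("T(K) a->b b->a\nT(K) Capture a->b", [none], false, false, false)

def Spec_reactions (out_str : String) (third_body : List (Option String)) (read_fake : Bool) (read_self : Bool) (read_rev : Bool) (out : List (List String × List String × List (Option String))) : Prop := out = reactions_alt out_str third_body read_fake read_self read_rev
instance (out_str : String) (third_body : List (Option String)) (read_fake : Bool) (read_self : Bool) (read_rev : Bool) (out : List (List String × List String × List (Option String))) : Decidable (Spec_reactions out_str third_body read_fake read_self read_rev out) := by unfold Spec_reactions; infer_instance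

-- ===== CLAIM (what is proved, stated in full; the proofs are below) =====
def Claim_equal_reactions : Prop := ∀ (out_str : String) (third_body : List (Option String)) (read_fake : Bool) (read_self : Bool) (read_rev : Bool), Dom_reactions out_str third_body read_fake read_self read_rev → Pre_reactions out_str third_body read_fake read_self read_rev → Spec_reactions out_str third_body read_fake read_self read_rev (reactions out_str third_body read_fake read_self read_rev)

-- ===== LEMMAS AND PROOFS =====

-- the flat token stream both programs consume, line by line
def pvTokens (out_str : String) : List String :=
  (PySem.Str.splitlines out_str).flatMap (fun line =>
    if PySem.Str.isIn "T(K)" line && PySem.Str.isIn "->" line then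
      PySem.List.slice (PySem.Str.split₀ (PySem.Str.strip line)) (some 1) none
    else [])

-- the pair(s) one surviving token contributes ([] if filtered out)
def pvEmit (read_fake read_self : Bool) (rxn : String) : List (String × String) :=
  match (PySem.Str.split? rxn "->").getD [] with
  | [] => []
  | rct :: rest₁ =>
    match rest₁ with
    | [] => []
    | prd :: rest₂ =>
      match rest₂ with
      | _ :: _ => []
      | [] =>
        if !read_fake && (PySem.Str.isIn "F" rxn || PySem.Str.isIn "B" rxn) then []
        else if !read_self && rct == prd then []
        else if prd == "" then []
        else [(rct, prd)]

def pvPairs (read_fake read_self : Bool) (ts : List String) : List (String × String) :=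
  ((PySem.Set.ofList ts).filter (fun rxn => rxn != "Capture")).flatMap (pvEmit read_fake read_self)

def pvRevD (ps : List (String × String)) : List (String × String) :=
  ps.foldl (fun s p => if s.contains (p.1, p.2) || s.contains (p.2, p.1) then s else s ++ [(p.1, p.2)]) []

-- a nested per-line fold is the fold over the flattened token stream
theorem pvNestedFold {σ : Type} (c : String → Bool) (g : String → List String)
    (step : σ → String → σ) (lines : List String) (s : σ) :
    lines.foldl (fun st l => if c l then (g l).foldl step st else st) s
    = (lines.flatMap (fun l => if c l then g l else [])).foldl step s := by
  induction lines generalizing s with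
  | nil => rfl
  | cons l ls ih =>
      simp only [List.foldl_cons, List.flatMap_cons, List.foldl_append]
      by_cases h : c l <;> simp [h, ih]

theorem pvA_tokens (out_str : String) :
    (PySem.Str.splitlines out_str).foldl (fun acc line =>
      if PySem.Str.isIn "T(K)" line && PySem.Str.isIn "->" line then
        acc ++ PySem.List.slice (PySem.Str.split₀ (PySem.Str.strip line)) (some 1) none
      else acc) []
    = pvTokens out_str := by
  have h : (fun (acc : List String) line =>
      if PySem.Str.isIn "T(K)" line && PySem.Str.isIn "->" line then
        acc ++ PySem.List.slice (PySem.Str.split₀ (PySem.Str.strip line)) (some 1) none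
      else acc)
    = (fun acc line => acc ++ (if PySem.Str.isIn "T(K)" line && PySem.Str.isIn "->" line then
        PySem.List.slice (PySem.Str.split₀ (PySem.Str.strip line)) (some 1) none else [])) := by
    funext acc line; split <;> simp
  rw [h, PySem.List.foldl_append_eq_flatMap]
  simp [pvTokens]

-- A's prefix-membership dedup is first-occurrence dedup (= Python set insertion order)
theorem pvDedup_eq (ts : List String) :
    ((PySem.List.enumerate ts 0).filter
      (fun p => !((PySem.List.slice ts none (some p.1)).contains p.2))).map (·.2)
    = PySem.Set.ofList ts := by
  induction ts using List.reverseRecOn with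
  | nil => rfl
  | append_singleton ts t ih =>
    rw [PySem.List.enumerate_append]
    simp only [PySem.List.enumerate_cons, PySem.List.enumerate_nil]
    rw [List.filter_append, List.map_append]
    have hpref : ∀ p ∈ PySem.List.enumerate ts 0,
        (!((PySem.List.slice (ts ++ [t]) none (some p.1)).contains p.2))
        = (!((PySem.List.slice ts none (some p.1)).contains p.2)) := by
      intro p hp
      rcases (PySem.List.mem_enumerate_iff ts 0 p).1 hp with ⟨k, hk, rfl⟩
      have h0 : (0 : Int) + (k : Int) = (k : Int) := by omega
      simp only [h0]
      rw [PySem.List.slice_to (ts ++ [t]) (Int.natCast_nonneg k),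
         PySem.List.slice_to ts (Int.natCast_nonneg k)]
      rw [Int.toNat_natCast, List.take_append_of_le_length (le_of_lt hk)]
    rw [List.filter_congr hpref, ih]
    have hsing : PySem.List.slice (ts ++ [t]) none (some ((ts.length : Int))) = ts := by
      rw [PySem.List.slice_to (ts ++ [t]) (Int.natCast_nonneg ts.length), Int.toNat_natCast,
         List.take_left]
    by_cases ht : t ∈ ts
    · rw [PySem.Set.ofList_append_singleton,
         PySem.Set.add_of_mem (by simpa [PySem.Set.mem_ofList] using ht)]
      simp [hsing, ht]
    · rw [PySem.Set.ofList_append_singleton,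
         PySem.Set.add_of_not_mem (by simpa [PySem.Set.mem_ofList] using ht)]
      simp [hsing, ht]

-- A's pair-building fold appends exactly what pvEmit yields per token
theorem pvPairFold_eq (read_fake read_self : Bool) (l : List String) (acc : List (String × String)) :
    l.foldl (fun pairs rxn =>
      match PySem.Str.split? rxn "->" with
      | some [rct, prd] =>
        if !read_fake && (PySem.Str.isIn "F" rxn || PySem.Str.isIn "B" rxn) then pairs
        else if !read_self && rct == prd then pairs
        else if prd != "" then pairs ++ [(rct, prd)]
        else pairs
      | _ => pairs) acc
    = acc ++ l.flatMap (pvEmit read_fake read_self) := by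
  induction l generalizing acc with
  | nil => simp
  | cons rxn l ih =>
    simp only [List.foldl_cons, List.flatMap_cons]
    rw [ih]
    have hstep : (match PySem.Str.split? rxn "->" with
      | some [rct, prd] =>
        if !read_fake && (PySem.Str.isIn "F" rxn || PySem.Str.isIn "B" rxn) then acc
        else if !read_self && rct == prd then acc
        else if prd != "" then acc ++ [(rct, prd)]
        else acc
      | _ => acc) = acc ++ pvEmit read_fake read_self rxn := by
      unfold pvEmit
      rcases hsp : PySem.Str.split? rxn "->" with _ | ls
      · simp
      · rcases ls with _ | ⟨rct, _ | ⟨prd, _ | ⟨x, xs⟩⟩⟩ <;> simp only [Option.getD_some] <;> [simp; simp; skip; simp]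
        split_ifs with h1 h2 h3 <;> simp_all
    rw [hstep, List.append_assoc]

-- the streaming loop invariant: B's state after any token prefix, in terms of A's pipeline stages
theorem pvLoop_inv (read_fake read_self read_rev : Bool) (tb : List (Option String)) (ts : List String) :
    ts.foldl (pvBStep read_fake read_self read_rev tb) (PySem.Set.empty, PySem.Set.empty, []) =
      (PySem.Set.ofList ts,
       (if read_rev then PySem.Set.empty else pvRevD (pvPairs read_fake read_self ts)),
       ((if read_rev then pvPairs read_fake read_self ts
         else pvRevD (pvPairs read_fake read_self ts)).map (fun p => ([p.1], [p.2], tb)))) := by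
  induction ts using List.reverseRecOn with
  | nil => cases read_rev <;> rfl
  | append_singleton ts t ih =>
    rw [List.foldl_append, ih]
    simp only [List.foldl_cons, List.foldl_nil]
    by_cases hmem : t ∈ ts
    · have h1 : PySem.Set.ofList (ts ++ [t]) = PySem.Set.ofList ts := by
        rw [PySem.Set.ofList_append_singleton,
           PySem.Set.add_of_mem (by simpa [PySem.Set.mem_ofList] using hmem)]
      have h2 : pvPairs read_fake read_self (ts ++ [t]) = pvPairs read_fake read_self ts := by
        simp [pvPairs, h1]
      unfold pvBStep
      simp [h1, h2, hmem]
    · have hofl : PySem.Set.ofList (ts ++ [t]) = PySem.Set.ofList ts ++ [t] := by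
        rw [PySem.Set.ofList_append_singleton,
           PySem.Set.add_of_not_mem (by simpa [PySem.Set.mem_ofList] using hmem)]
      have hadd : (PySem.Set.ofList ts).add t = PySem.Set.ofList ts ++ [t] :=
        PySem.Set.add_of_not_mem (by simpa [PySem.Set.mem_ofList] using hmem)
      by_cases hcap : t = "Capture"
      · subst hcap
        have h2 : pvPairs read_fake read_self (ts ++ ["Capture"]) = pvPairs read_fake read_self ts := by
          unfold pvPairs
          rw [hofl, List.filter_append]
          simp
        unfold pvBStep
        simp [h2, hofl, hmem]
      · have hpp : pvPairs read_fake read_self (ts ++ [t])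
            = pvPairs read_fake read_self ts ++ pvEmit read_fake read_self t := by
          unfold pvPairs
          rw [hofl, List.filter_append]
          simp [hcap]
        unfold pvBStep
        rw [hpp]
        rcases hsp : PySem.Str.split? t "->" with _ | ls
        · have hem : pvEmit read_fake read_self t = [] := by simp [pvEmit, hsp]
          simp [hem, hofl, hmem, hcap]
        · rcases ls with _ | ⟨rct, _ | ⟨prd, _ | ⟨x, xs⟩⟩⟩
          · have hem : pvEmit read_fake read_self t = [] := by simp [pvEmit, hsp]
            simp [hem, hofl, hmem, hcap]
          · have hem : pvEmit read_fake read_self t = [] := by simp [pvEmit, hsp]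
            simp [hem, hofl, hmem, hcap]
          · -- the two-element case: the same filter chain on both sides
            rw [if_neg (by simpa using hmem), if_neg (by simpa using hcap)]
            simp only [pvEmit, hsp, Option.getD_some]
            cases hrr : read_rev
            · -- read_rev = false
              simp only [Bool.not_false, Bool.false_eq_true, if_true, if_false]
              have hrevstep : pvRevD (pvPairs read_fake read_self ts ++ [(rct, prd)])
                  = (if (PySem.Set.contains (pvRevD (pvPairs read_fake read_self ts)) (rct, prd)
                        || PySem.Set.contains (pvRevD (pvPairs read_fake read_self ts)) (prd, rct)) = true
                     then pvRevD (pvPairs read_fake read_self ts)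
                     else pvRevD (pvPairs read_fake read_self ts) ++ [(rct, prd)]) := by
                unfold pvRevD
                rw [List.foldl_append]
                simp only [List.foldl_cons, List.foldl_nil, PySem.Set.contains_eq_listContains]
                rfl
              split_ifs with h1 h2 h3 h4
              · simp [hofl, hadd]
              · simp [hofl, hadd]
              · simp [hofl, hadd]
              · -- duplicate (or reversed) pair: skipped
                rw [hrevstep, if_pos h4]
                simp [hofl, hadd]
              · -- new pair: accepted and appended
                rw [hrevstep, if_neg h4]
                have hnm : (rct, prd) ∉ pvRevD (pvPairs read_fake read_self ts) := by
                  intro hm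
                  exact h4 (by simp [PySem.Set.contains_eq_listContains, hm])
                have haddp : PySem.Set.add (pvRevD (pvPairs read_fake read_self ts)) (rct, prd)
                    = pvRevD (pvPairs read_fake read_self ts) ++ [(rct, prd)] :=
                  PySem.Set.add_of_not_mem hnm
                simp [hofl, hadd, haddp]
            · -- read_rev = true
              simp only [Bool.not_true, Bool.false_eq_true, if_true, if_false]
              split_ifs with h1 h2 h3 <;> simp [hofl, hadd]
          · have hem : pvEmit read_fake read_self t = [] := by simp [pvEmit, hsp]
            simp [hem, hofl, hmem, hcap]

-- ===== VERDICT (by name: the statement is the Claim_ definition above) =====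
theorem reactions_spec : Claim_equal_reactions := by
  intro out_str third_body read_fake read_self read_rev _ _
  unfold Spec_reactions
  simp only [reactions, reactions_alt]
  rw [pvA_tokens, pvNestedFold, pvDedup_eq, pvPairFold_eq, pvLoop_inv]
  rw [PySem.List.foldl_append_singleton_eq_map]
  cases read_rev <;> simp [pvPairs, pvRevD, pvTokens]
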